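-- pv_equiv track=rewrite | github.com/Viknesh-Rajaramon/Leetcode-Problems | Algorithms/Medium/3840_House_Robber_V.py | rob
-- ===== SOURCE A (Python) =====
-- from typing import List
--
-- def rob(nums: List[int], colors: List[int]) -> int:
--     n = len(nums)
--     dp_0, dp_1 = 0, nums[0]
--     for i in range(1, n):
--         if colors[i-1] == colors[i]:
--             new_dp_1 = dp_0 + nums[i]
--             new_dp_0 = max(dp_0, dp_1)
--         else:
--             new_dp_0 = max(dp_0, dp_1)
--             new_dp_1 = max(dp_0, dp_1) + nums[i]
--
--         dp_0, dp_1 = new_dp_0, new_dp_1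
--
--     return max(dp_0, dp_1)
-- ===== SOURCE B (Python) =====
-- from typing import List
--
-- def _rob_run(run: List[int]) -> int:
--     take, skip = 0, 0
--     for v in run:
--         take, skip = skip + v, max(take, skip)
--     return max(take, skip)
--
-- def rob(nums: List[int], colors: List[int]) -> int:
--     # Split into maximal runs of equal color, solve classic House Robber per run, sum.
--     runs = []
--     start = 0
--     for i in range(1, len(nums)):
--         if colors[i-1] != colors[i]:
--             runs.append(nums[start:i])
--             start = i
--     runs.append(nums[start:len(nums)])
--     total = 0
--     for run in runs:
--         total += _rob_run(run)
--     return total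
-- ===== Notes on version B (the rewrite author's own statement) =====
-- stated objective: alternative
-- what changed: Replaces the single flat two-state rolling DP with an explicit split of nums into maximal equal-color runs, an independent classic take/skip House-Robber solve per run, and a sum of the per-run optima.
import Mathlib
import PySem

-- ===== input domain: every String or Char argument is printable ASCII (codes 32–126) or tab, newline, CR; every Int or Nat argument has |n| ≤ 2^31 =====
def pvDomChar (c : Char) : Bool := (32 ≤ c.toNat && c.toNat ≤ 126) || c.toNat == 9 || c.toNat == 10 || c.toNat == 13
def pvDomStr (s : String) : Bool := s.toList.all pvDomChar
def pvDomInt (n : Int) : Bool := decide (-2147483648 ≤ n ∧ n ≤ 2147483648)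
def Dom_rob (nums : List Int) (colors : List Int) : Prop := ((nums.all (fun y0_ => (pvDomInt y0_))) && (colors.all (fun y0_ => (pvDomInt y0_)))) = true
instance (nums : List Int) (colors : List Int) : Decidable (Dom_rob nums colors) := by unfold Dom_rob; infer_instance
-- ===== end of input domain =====

-- B replaces A's flat two-state rolling DP with: split nums into maximal equal-color runs,
-- solve the classic House Robber (take/skip) on each run independently, and sum the per-run optima.

-- ===== PORT A =====
-- one iteration of A's for-loop (dp = (dp_0, dp_1))
def robStepA (colors : List Int) (nums : List Int) (dp : Int × Int) (i : Int) : Int × Int :=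
  if PySem.List.pyGetD colors (i - 1) 0 = PySem.List.pyGetD colors i 0 then
    (max dp.1 dp.2, dp.1 + PySem.List.pyGetD nums i 0)
  else
    (max dp.1 dp.2, max dp.1 dp.2 + PySem.List.pyGetD nums i 0)

def rob (nums : List Int) (colors : List Int) : Int :=
  let n : Int := nums.length
  let dp := (PySem.List.pyRange 1 n 1).foldl (robStepA colors nums) (0, PySem.List.pyGetD nums 0 0)
  max dp.1 dp.2

-- ===== PORT B =====
-- _rob_run: classic House Robber on one run (state = (take, skip))
def runStep (p : Int × Int) (v : Int) : Int × Int := (p.2 + v, max p.1 p.2)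

def robRun (run : List Int) : Int :=
  let p := run.foldl runStep (0, 0)
  max p.1 p.2

-- one iteration of B's run-building loop (st = (runs, start))
def robStepB (colors : List Int) (nums : List Int) (st : List (List Int) × Int) (i : Int) : List (List Int) × Int :=
  if PySem.List.pyGetD colors (i - 1) 0 ≠ PySem.List.pyGetD colors i 0 then
    (st.1 ++ [PySem.List.slice nums (some st.2) (some i)], i)
  else
    st

def rob_alt (nums : List Int) (colors : List Int) : Int :=
  let st := (PySem.List.pyRange 1 (nums.length : Int) 1).foldl (robStepB colors nums) ([], 0)
  let runs := st.1 ++ [PySem.List.slice nums (some st.2) (some (nums.length : Int))]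
  runs.foldl (fun total run => total + robRun run) 0

-- ===== PRECONDITION & SPEC =====
-- Pre_ excludes exactly the inputs where Python A raises IndexError: empty nums (nums[0]),
-- and colors shorter than nums when there are at least two houses (colors[i] lookups in the loop).
def Pre_rob (nums : List Int) (colors : List Int) : Prop :=
  nums ≠ [] ∧ (nums.length = 1 ∨ nums.length ≤ colors.length)
instance (nums : List Int) (colors : List Int) : Decidable (Pre_rob nums colors) := by unfold Pre_rob; infer_instance
def pvWitness_rob : List Int × List Int := ([2, 5, 3], [1, 1, 2])

def Spec_rob (nums : List Int) (colors : List Int) (out : Int) : Prop := out = rob_alt nums colors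
instance (nums : List Int) (colors : List Int) (out : Int) : Decidable (Spec_rob nums colors out) := by unfold Spec_rob; infer_instance

-- ===== CLAIM (what is proved, stated in full; the proofs are below) =====
def Claim_equal_rob : Prop := ∀ (nums : List Int) (colors : List Int), Dom_rob nums colors → Pre_rob nums colors → Spec_rob nums colors (rob nums colors)

-- ===== LEMMAS AND PROOFS =====

-- extending the current run's slice by one element
lemma take_extend (ns : List Int) (s k : Nat) (hs : s ≤ k) (hk : k < ns.length) :
    (ns.drop s).take (k + 1 - s) = (ns.drop s).take (k - s) ++ [ns[k]] := by
  have h1 : k + 1 - s = (k - s) + 1 := by omega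
  rw [h1, List.take_add_one, List.getElem?_drop]
  have h2 : s + (k - s) = k := by omega
  simp [h2, hk]

-- Loop invariant: after processing indices 1..k-1, A's dp state equals
-- (sum of per-run optima over B's completed runs) + the take/skip state of B's current run.
lemma rob_inv (ns cs : List Int) : ∀ (k : Nat), 1 ≤ k → k ≤ ns.length →
    ∃ (s : Nat),
      ((PySem.List.pyRange 1 (k : Int) 1).foldl (robStepB cs ns) ([], 0)).2 = (s : Int) ∧ s < k ∧
      ((PySem.List.pyRange 1 (k : Int) 1).foldl (robStepA cs ns) (0, PySem.List.pyGetD ns 0 0)).1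
        = ((((PySem.List.pyRange 1 (k : Int) 1).foldl (robStepB cs ns) ([], 0)).1.map robRun).sum
           + (((ns.drop s).take (k - s)).foldl runStep (0, 0)).2) ∧
      ((PySem.List.pyRange 1 (k : Int) 1).foldl (robStepA cs ns) (0, PySem.List.pyGetD ns 0 0)).2
        = ((((PySem.List.pyRange 1 (k : Int) 1).foldl (robStepB cs ns) ([], 0)).1.map robRun).sum
           + (((ns.drop s).take (k - s)).foldl runStep (0, 0)).1) := by
  intro k hk
  induction k, hk using Nat.le_induction with
  | base =>
    intro hlen
    refine ⟨0, ?_⟩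
    obtain ⟨x, t, rfl⟩ : ∃ x t, ns = x :: t := by
      cases ns with
      | nil => simp at hlen
      | cons x t => exact ⟨x, t, rfl⟩
    simp [runStep, PySem.List.pyGetD_zero_cons]
  | succ k hk ih =>
    intro hlen
    have hklen : k < ns.length := by omega
    obtain ⟨s, hb2, hsk, h1, h2⟩ := ih (by omega)
    have hrange : PySem.List.pyRange 1 ((k+1 : Nat) : Int) 1
        = PySem.List.pyRange 1 (k : Int) 1 ++ [(k : Int)] := by
      push_cast
      exact PySem.List.pyRange_one_succ_right (by exact_mod_cast hk)
    rw [hrange]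
    simp only [List.foldl_append, List.foldl_cons, List.foldl_nil]
    have hnv : PySem.List.pyGetD ns ((k : Nat) : Int) 0 = ns[k] := by
      rw [PySem.List.pyGetD_natCast]
      simp [List.getD, hklen]
    by_cases hc : PySem.List.pyGetD cs (((k:Nat):Int) - 1) 0 = PySem.List.pyGetD cs ((k:Nat):Int) 0
    · -- same color: B keeps its state, A extends the current run
      refine ⟨s, ?_⟩
      rw [robStepA, robStepB, if_pos hc, if_neg (by simpa using hc)]
      rw [take_extend ns s k (by omega) hklen, List.foldl_append, List.foldl_cons, List.foldl_nil,
        hb2, hnv]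
      refine ⟨rfl, by omega, ?_, ?_⟩
      · simp only [runStep]; omega
      · simp only [runStep]; omega
    · -- color break: B closes the run and starts a new one at k
      refine ⟨k, ?_⟩
      rw [robStepA, robStepB, if_neg hc, if_pos (by simpa using hc)]
      rw [hb2]
      have hslice : PySem.List.slice ns (some ((s:Nat):Int)) (some ((k:Nat):Int))
          = (ns.drop s).take (k - s) := PySem.List.slice_natCast ns s k
      have hnew : (ns.drop k).take (k + 1 - k) = [ns[k]] := by
        have := take_extend ns k k (le_refl k) hklen
        simpa using this
      rw [hslice, hnew]
      refine ⟨rfl, by omega, ?_, ?_⟩ <;>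
      · simp only [List.map_append, List.map_cons, List.map_nil, List.sum_append,
          List.sum_cons, List.sum_nil, robRun, List.foldl_cons, List.foldl_nil, runStep]
        omega

-- ===== VERDICT (by name: the statement is the Claim_ definition above) =====
theorem rob_spec : Claim_equal_rob := by
  intro nums colors _ hpre
  unfold Spec_rob
  have hlen : 1 ≤ nums.length := List.length_pos_iff.mpr hpre.1
  obtain ⟨s, hb2, hsk, h1, h2⟩ := rob_inv nums colors nums.length hlen (le_refl _)
  simp only [rob, rob_alt]
  rw [PySem.List.foldl_add, hb2, PySem.List.slice_natCast]
  simp only [List.map_append, List.map_cons, List.map_nil, List.sum_append, List.sum_cons,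
    List.sum_nil, robRun]
  omega
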